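-- pv_equiv track=rewrite | github.com/Nenavathnaresh/Python_DSA | Greedy-Algorithms/Medium/string-rp-or-pr.py | solve
-- ===== SOURCE A (Python) =====
-- def solve(X, Y, S):
--     def remove_and_score(s, sub, score):
--         stack = []
--         total_score = 0
--         for char in s:
--             if stack and stack[-1] + char == sub:
--                 stack.pop()
--                 total_score += score
--             else:
--                 stack.append(char)
--         return ''.join(stack), total_score
--
--     if X >= Y:
--         # Remove "pr" first
--         remaining_string, score1 = remove_and_score(S, "pr", X)
--         _, score2 = remove_and_score(remaining_string, "rp", Y)
--     else:
--         # Remove "rp" first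
--         remaining_string, score1 = remove_and_score(S, "rp", Y)
--         _, score2 = remove_and_score(remaining_string, "pr", X)
--
--     return score1 + score2
-- ===== SOURCE B (Python) =====
-- def solve(X, Y, S):
--     # One pass with two counters per segment instead of a stack and a second pass.
--     if X >= Y:
--         first, second, hi, lo = 'p', 'r', X, Y
--     else:
--         first, second, hi, lo = 'r', 'p', Y, X
--     a = 0  # unmatched `first` chars in the current p/r segment
--     b = 0  # unmatched `second` chars in the current p/r segment
--     total = 0
--     for c in S:
--         if c == first:
--             a += 1
--         elif c == second:
--             if a > 0:
--                 a -= 1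
--                 total += hi
--             else:
--                 b += 1
--         else:
--             total += lo * min(a, b)
--             a = 0
--             b = 0
--     total += lo * min(a, b)
--     return total
-- ===== Notes on version B (the rewrite author's own statement) =====
-- stated objective: alternative
-- what changed: Replaced the stack-based pair removal run twice over the string by a single left-to-right pass that keeps two counters of unmatched 'p'/'r' characters per segment and flushes lo*min(a,b) at each separator, so no stack and no second pass over the remaining string are needed.
import Mathlib
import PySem

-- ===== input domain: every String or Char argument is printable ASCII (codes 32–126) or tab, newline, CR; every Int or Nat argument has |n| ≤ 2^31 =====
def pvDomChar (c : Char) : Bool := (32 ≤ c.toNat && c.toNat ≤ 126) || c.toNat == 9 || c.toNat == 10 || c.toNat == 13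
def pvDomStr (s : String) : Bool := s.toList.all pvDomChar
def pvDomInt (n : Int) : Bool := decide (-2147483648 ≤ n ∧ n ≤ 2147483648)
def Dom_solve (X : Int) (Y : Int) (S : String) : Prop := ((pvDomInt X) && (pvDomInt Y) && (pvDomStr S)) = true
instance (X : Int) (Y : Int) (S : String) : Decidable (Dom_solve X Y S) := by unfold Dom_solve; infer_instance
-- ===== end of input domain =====

-- B replaces A's stack-based removal pass run twice over the string by a single pass with two per-segment counters; objective: alternative (same cost, no stack, no second pass).

-- ===== PORT A =====
-- Python list used as a stack (append/pop at the end) is represented head-first: push = cons,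
-- stack[-1] = head, pop = tail; ''.join(stack) = String.ofList stack.reverse.
def raStep (sub : List Char) (score : Int) (st : List Char × Int) (c : Char) : List Char × Int :=
  match st with
  | (x :: rest, t) => if [x, c] = sub then (rest, t + score) else (c :: x :: rest, t)
  | ([], t) => ([c], t)

def remove_and_score (s : String) (sub : String) (score : Int) : String × Int :=
  let r := s.toList.foldl (raStep sub.toList score) ([], 0)
  (String.ofList r.1.reverse, r.2)

def solve (X : Int) (Y : Int) (S : String) : Int :=
  if X ≥ Y then
    let p1 := remove_and_score S "pr" X
    p1.2 + (remove_and_score p1.1 "rp" Y).2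
  else
    let p1 := remove_and_score S "rp" Y
    p1.2 + (remove_and_score p1.1 "pr" X).2

-- ===== PORT B =====
-- state = (a, b, total): unmatched `first` chars, unmatched `second` chars, score so far
def bStep (first second : Char) (hi lo : Int) (st : Int × Int × Int) (c : Char) : Int × Int × Int :=
  if c = first then (st.1 + 1, st.2.1, st.2.2)
  else if c = second then
    (if st.1 > 0 then (st.1 - 1, st.2.1, st.2.2 + hi) else (st.1, st.2.1 + 1, st.2.2))
  else (0, 0, st.2.2 + lo * min st.1 st.2.1)

def solve_alt (X : Int) (Y : Int) (S : String) : Int :=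
  let cfg := if X ≥ Y then (('p' : Char), ('r' : Char), X, Y) else (('r' : Char), ('p' : Char), Y, X)
  let r := S.toList.foldl (bStep cfg.1 cfg.2.1 cfg.2.2.1 cfg.2.2.2) (0, 0, 0)
  r.2.2 + cfg.2.2.2 * min r.1 r.2.1

-- ===== PRECONDITION & SPEC =====
def Spec_solve (X : Int) (Y : Int) (S : String) (out : Int) : Prop := out = solve_alt X Y S
instance (X : Int) (Y : Int) (S : String) (out : Int) : Decidable (Spec_solve X Y S out) := by unfold Spec_solve; infer_instance

-- ===== CLAIM (what is proved, stated in full; the proofs are below) =====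
def Claim_equal_solve : Prop := ∀ (X : Int) (Y : Int) (S : String), Dom_solve X Y S → Spec_solve X Y S (solve X Y S)

-- ===== LEMMAS AND PROOFS =====

-- abbreviations for the two passes of A and the single pass of B
def run1 (f s : Char) (hi : Int) (l : List Char) (st : List Char × Int) : List Char × Int :=
  l.foldl (raStep [f, s] hi) st
def run2 (f s : Char) (lo : Int) (l : List Char) (st : List Char × Int) : List Char × Int :=
  l.foldl (raStep [s, f] lo) st
def runB (f s : Char) (hi lo : Int) (l : List Char) (st : Int × Int × Int) : Int × Int × Int :=
  l.foldl (bStep f s hi lo) st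
def Aval (f s : Char) (hi lo : Int) (l : List Char) (st : List Char) (t : Int) : Int :=
  let r := run1 f s hi l (st, t)
  r.2 + (run2 f s lo r.1.reverse ([], 0)).2
def Bval (f s : Char) (hi lo : Int) (l : List Char) (a b t : Int) : Int :=
  let r := runB f s hi lo l (a, b, t)
  r.2.2 + lo * min r.1 r.2.1
-- stack below the current p/r segment: empty or topped by a separator character
def SepOK (f s : Char) (z : List Char) : Prop :=
  z = [] ∨ ∃ x r, z = x :: r ∧ x ≠ f ∧ x ≠ s
-- stack whose top (if any) is not the character u
def HeadNe (u : Char) (st : List Char) : Prop :=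
  st = [] ∨ ∃ x r, st = x :: r ∧ x ≠ u

theorem raStep_push (u v : Char) (sc : Int) (st : List Char) (t : Int) (c : Char) (h : c ≠ v) :
    raStep [u, v] sc (st, t) c = (c :: st, t) := by
  cases st with
  | nil => simp [raStep]
  | cons x rest => simp [raStep, h]

theorem raStep_push_of_head (u v : Char) (sc : Int) (st : List Char) (t : Int) (c : Char)
    (h : HeadNe u st) : raStep [u, v] sc (st, t) c = (c :: st, t) := by
  rcases h with rfl | ⟨x, r, rfl, hx⟩
  · simp [raStep]
  · simp [raStep, hx]

theorem raStep_pop (u v : Char) (sc : Int) (rest : List Char) (t : Int) :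
    raStep [u, v] sc (u :: rest, t) v = (rest, t + sc) := by
  simp [raStep]

theorem run2_append (f s : Char) (lo : Int) (l1 l2 : List Char) (st : List Char × Int) :
    run2 f s lo (l1 ++ l2) st = run2 f s lo l2 (run2 f s lo l1 st) := by
  simp [run2, List.foldl_append]

theorem run2_pushAll (f s : Char) (lo : Int) (l : List Char) (hl : ∀ c ∈ l, c ≠ f)
    (st : List Char) (t : Int) : run2 f s lo l (st, t) = (l.reverse ++ st, t) := by
  induction l generalizing st with
  | nil => simp [run2]
  | cons c l ih =>
    have h1 : raStep [s, f] lo (st, t) c = (c :: st, t) :=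
      raStep_push s f lo st t c (hl c (by simp))
    simp only [run2, List.foldl_cons, h1]
    simpa [run2] using ih (fun c hc => hl c (by simp [hc])) (c :: st)

theorem run2_f_nop (f s : Char) (lo : Int) (hfs : f ≠ s) : ∀ (i : Nat) (st : List Char) (t : Int),
    HeadNe s st → run2 f s lo (List.replicate i f) (st, t) = (List.replicate i f ++ st, t) := by
  intro i
  induction i with
  | zero => intro st t _; simp [run2]
  | succ i ih =>
    intro st t h
    have h1 : raStep [s, f] lo (st, t) f = (f :: st, t) := raStep_push_of_head s f lo st t f h
    simp only [List.replicate_succ, run2, List.foldl_cons, h1]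
    have h2 := ih (f :: st) t (Or.inr ⟨f, st, rfl, hfs⟩)
    simp only [run2] at h2
    have h3 : List.replicate i f ++ f :: st = f :: (List.replicate i f ++ st) := by
      rw [← List.singleton_append, ← List.append_assoc, ← List.replicate_succ',
        List.replicate_succ, List.cons_append]
    rw [h2, h3, List.cons_append]

theorem run2_f_match (f s : Char) (lo : Int) (hfs : f ≠ s) :
    ∀ (i j : Nat) (st : List Char) (t : Int), HeadNe s st →
    (run2 f s lo (List.replicate i f) (List.replicate j s ++ st, t)).2
      = t + lo * min (i : Int) (j : Int) := by
  intro i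
  induction i with
  | zero =>
    intro j st t _
    simp [run2]
  | succ i ih =>
    intro j st t h
    cases j with
    | zero =>
      have := run2_f_nop f s lo hfs (i + 1) st t h
      have hm : min ((i : Int) + 1) (0 : Int) = 0 := by omega
      simp only [List.replicate_zero, List.nil_append] at *
      rw [this]
      push_cast
      rw [hm]; ring
    | succ j =>
      have h1 : raStep [s, f] lo (s :: (List.replicate j s ++ st), t) f
          = (List.replicate j s ++ st, t + lo) := raStep_pop s f lo _ t
      simp only [List.replicate_succ, run2, List.foldl_cons, List.cons_append, h1]
      have := ih j st (t + lo) h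
      simp only [run2] at this
      rw [this]
      have : min ((i : Int) + 1) ((j : Int) + 1) = min (i : Int) (j : Int) + 1 := by omega
      push_cast
      rw [this]; ring

theorem run2_seg (f s : Char) (lo : Int) (hfs : f ≠ s) (i j : Nat) (st : List Char) (t : Int)
    (h : HeadNe s st) :
    (run2 f s lo (List.replicate j s ++ List.replicate i f) (st, t)).2
      = t + lo * min (i : Int) (j : Int) := by
  have h1 := run2_pushAll f s lo (List.replicate j s)
    (by intro c hc; rw [List.eq_of_mem_replicate hc]; exact fun hsf => hfs hsf.symm) st t
  simp only [run2, List.foldl_append] at *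
  rw [h1]
  have := run2_f_match f s lo hfs i j st t h
  simpa [run2, List.reverse_replicate] using this

theorem run2_sep_head (f s : Char) (lo : Int) (z : List Char) (h : SepOK f s z) :
    HeadNe s (run2 f s lo z.reverse ([], 0)).1 := by
  rcases h with rfl | ⟨x, r, rfl, hxf, hxs⟩
  · left; simp [run2]
  · right
    refine ⟨x, (run2 f s lo r.reverse ([], 0)).1, ?_, hxs⟩
    rw [List.reverse_cons, run2_append]
    rw [show run2 f s lo r.reverse ([], 0)
        = ((run2 f s lo r.reverse ([], 0)).1, (run2 f s lo r.reverse ([], 0)).2) from rfl]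
    rw [show run2 f s lo [x] ((run2 f s lo r.reverse ([], 0)).1, (run2 f s lo r.reverse ([], 0)).2)
        = raStep [s, f] lo ((run2 f s lo r.reverse ([], 0)).1, (run2 f s lo r.reverse ([], 0)).2) x
        from rfl]
    rw [raStep_push s f lo _ _ x hxf]

-- total of A's second pass on the reversed final stack of the shape the invariant maintains
theorem run2_oldrev (f s : Char) (lo : Int) (hfs : f ≠ s) (i j : Nat) (z : List Char)
    (h : SepOK f s z) :
    (run2 f s lo (List.replicate i f ++ List.replicate j s ++ z).reverse ([], 0)).2
      = (run2 f s lo z.reverse ([], 0)).2 + lo * min (i : Int) (j : Int) := by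
  have hh := run2_sep_head f s lo z h
  have hrw : (List.replicate i f ++ List.replicate j s ++ z).reverse
      = z.reverse ++ (List.replicate j s ++ List.replicate i f) := by
    simp [List.reverse_append, List.reverse_replicate]
  rw [hrw, run2_append]
  rw [show run2 f s lo z.reverse ([], 0)
      = ((run2 f s lo z.reverse ([], 0)).1, (run2 f s lo z.reverse ([], 0)).2) from rfl]
  exact run2_seg f s lo hfs i j _ _ hh

theorem runB_shift (f s : Char) (hi lo : Int) : ∀ (l : List Char) (a b t u : Int),
    runB f s hi lo l (a, b, t + u)
      = ((runB f s hi lo l (a, b, t)).1, (runB f s hi lo l (a, b, t)).2.1,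
         (runB f s hi lo l (a, b, t)).2.2 + u) := by
  intro l
  induction l with
  | nil => intro a b t u; simp [runB]
  | cons c l ih =>
    intro a b t u
    simp only [runB, List.foldl_cons, bStep]
    split_ifs with h1 h2 h3 <;> simp only [runB] at ih ⊢
    · exact ih (a + 1) b t u
    · rw [show t + u + hi = (t + hi) + u by ring]; exact ih (a - 1) b (t + hi) u
    · exact ih a (b + 1) t u
    · rw [show t + u + lo * min a b = (t + lo * min a b) + u by ring]
      exact ih 0 0 (t + lo * min a b) u

theorem Bval_shift (f s : Char) (hi lo : Int) (l : List Char) (a b t u : Int) :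
    Bval f s hi lo l a b (t + u) = Bval f s hi lo l a b t + u := by
  simp only [Bval, runB_shift]; ring

theorem main_inv (f s : Char) (hi lo : Int) (hfs : f ≠ s) :
    ∀ (l : List Char) (i j : Nat) (z : List Char) (t : Int), SepOK f s z →
    Aval f s hi lo l (List.replicate i f ++ List.replicate j s ++ z) t
      = (run2 f s lo z.reverse ([], 0)).2 + Bval f s hi lo l (i : Int) (j : Int) t := by
  intro l
  induction l with
  | nil =>
    intro i j z t hz
    simp only [Aval, run1, List.foldl_nil]
    rw [run2_oldrev f s lo hfs i j z hz]
    simp only [Bval, runB, List.foldl_nil]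
    ring
  | cons c l ih =>
    intro i j z t hz
    by_cases hcf : c = f
    · -- push: the new stack is replicate (i+1) f ++ replicate j s ++ z
      have hA : Aval f s hi lo (c :: l)
          (List.replicate i f ++ List.replicate j s ++ z) t
          = Aval f s hi lo l (List.replicate (i + 1) f ++ List.replicate j s ++ z) t := by
        simp only [Aval, run1, List.foldl_cons,
          raStep_push f s hi _ t c (by rw [hcf]; exact hfs)]
        rw [hcf]
        simp only [List.replicate_succ, List.cons_append, List.append_assoc]
      have hB : Bval f s hi lo (c :: l) (i : Int) (j : Int) t
          = Bval f s hi lo l ((i : Int) + 1) (j : Int) t := by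
        simp only [Bval, runB, List.foldl_cons, bStep, if_pos hcf]
      rw [hA, hB, ih (i + 1) j z t hz]
      push_cast
      ring
    · by_cases hcs : c = s
      · cases i with
        | succ i =>
          -- pop: match the top f, score hi
          have hstep : ∀ rest : List Char, raStep [f, s] hi (f :: rest, t) c
              = (rest, t + hi) := by
            intro rest; rw [hcs]; exact raStep_pop f s hi rest t
          have hA : Aval f s hi lo (c :: l)
              (List.replicate (i + 1) f ++ List.replicate j s ++ z) t
              = Aval f s hi lo l (List.replicate i f ++ List.replicate j s ++ z) (t + hi) := by
            simp only [Aval, run1, List.foldl_cons, List.replicate_succ, List.cons_append,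
              List.append_assoc]
            rw [hstep]
          have hcast : (((i + 1 : Nat) : Int)) - 1 = (i : Int) := by push_cast; ring
          have hB : Bval f s hi lo (c :: l) ((i + 1 : Nat) : Int) (j : Int) t
              = Bval f s hi lo l (i : Int) (j : Int) (t + hi) := by
            simp only [Bval, runB, List.foldl_cons, bStep, if_neg hcf, if_pos hcs,
              if_pos (show (((i + 1 : Nat) : Int)) > 0 by push_cast; omega), hcast]
          rw [hA, hB, ih i j z (t + hi) hz]
        | zero =>
          -- unmatched second char: pushed on top of the s-block
          have hhead : HeadNe f (List.replicate j s ++ z) := by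
            cases j with
            | succ j =>
              exact Or.inr ⟨s, List.replicate j s ++ z,
                by rw [List.replicate_succ, List.cons_append], fun h => hfs h.symm⟩
            | zero =>
              simp only [List.replicate_zero, List.nil_append]
              rcases hz with rfl | ⟨x, r, rfl, hxf, _⟩
              · exact Or.inl rfl
              · exact Or.inr ⟨x, r, rfl, hxf⟩
          have hA : Aval f s hi lo (c :: l)
              (List.replicate 0 f ++ List.replicate j s ++ z) t
              = Aval f s hi lo l (List.replicate 0 f ++ List.replicate (j + 1) s ++ z) t := by
            simp only [Aval, run1, List.foldl_cons, List.replicate_zero, List.nil_append,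
              raStep_push_of_head f s hi (List.replicate j s ++ z) t c hhead]
            rw [hcs]
            simp only [List.replicate_succ, List.cons_append]
          have hcast : (((j : Nat) : Int)) + 1 = ((j + 1 : Nat) : Int) := by push_cast; ring
          have hB : Bval f s hi lo (c :: l) ((0 : Nat) : Int) (j : Int) t
              = Bval f s hi lo l ((0 : Nat) : Int) ((j + 1 : Nat) : Int) t := by
            simp only [Bval, runB, List.foldl_cons, bStep, if_neg hcf, if_pos hcs,
              if_neg (show ¬(((0 : Nat) : Int) > 0) by omega), hcast]
          rw [hA, hB, ih 0 (j + 1) z t hz]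
      · -- separator: starts a fresh segment, flushes lo * min i j on B's side
        have hA : Aval f s hi lo (c :: l)
            (List.replicate i f ++ List.replicate j s ++ z) t
            = Aval f s hi lo l
              (c :: (List.replicate i f ++ List.replicate j s ++ z)) t := by
          simp only [Aval, run1, List.foldl_cons, raStep_push f s hi _ t c hcs]
        have hz' : SepOK f s (c :: (List.replicate i f ++ List.replicate j s ++ z)) :=
          Or.inr ⟨c, _, rfl, hcf, hcs⟩
        have hih := ih 0 0 (c :: (List.replicate i f ++ List.replicate j s ++ z)) t hz'
        simp only [List.replicate_zero, List.nil_append] at hih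
        rw [hA, hih]
        -- the flushed segment total re-appears in the second pass over the new stack
        have hrun : (run2 f s lo (c :: (List.replicate i f ++ List.replicate j s ++ z)).reverse
            ([], 0)).2 = (run2 f s lo z.reverse ([], 0)).2 + lo * min (i : Int) (j : Int) := by
          rw [List.reverse_cons, run2_append]
          rw [show run2 f s lo (List.replicate i f ++ List.replicate j s ++ z).reverse ([], 0)
              = ((run2 f s lo (List.replicate i f ++ List.replicate j s ++ z).reverse ([], 0)).1,
                 (run2 f s lo (List.replicate i f ++ List.replicate j s ++ z).reverse ([], 0)).2)
              from rfl]
          rw [show run2 f s lo [c]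
                ((run2 f s lo (List.replicate i f ++ List.replicate j s ++ z).reverse ([], 0)).1,
                 (run2 f s lo (List.replicate i f ++ List.replicate j s ++ z).reverse ([], 0)).2)
              = raStep [s, f] lo
                ((run2 f s lo (List.replicate i f ++ List.replicate j s ++ z).reverse ([], 0)).1,
                 (run2 f s lo (List.replicate i f ++ List.replicate j s ++ z).reverse ([], 0)).2) c
              from rfl]
          rw [raStep_push s f lo _ _ c hcf]
          exact run2_oldrev f s lo hfs i j z hz
        have hB : Bval f s hi lo (c :: l) (i : Int) (j : Int) t
            = Bval f s hi lo l 0 0 t + lo * min (i : Int) (j : Int) := by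
          simp only [Bval, runB, List.foldl_cons, bStep, if_neg hcf, if_neg hcs]
          have := Bval_shift f s hi lo l 0 0 t (lo * min (i : Int) (j : Int))
          simp only [Bval, runB] at this
          exact this
        rw [hrun, hB]
        ring_nf

theorem main_eq (f s : Char) (hi lo : Int) (hfs : f ≠ s) (l : List Char) :
    Aval f s hi lo l [] 0 = Bval f s hi lo l 0 0 0 := by
  have := main_inv f s hi lo hfs l 0 0 [] 0 (Or.inl rfl)
  simpa [run2] using this

-- both calls of remove_and_score composed, rewritten as Aval over the character list
theorem solve_glueA (S : String) (sub1 sub2 : String) (f s : Char)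
    (h1 : sub1.toList = [f, s]) (h2 : sub2.toList = [s, f]) (hi lo : Int) :
    (remove_and_score S sub1 hi).2 + (remove_and_score (remove_and_score S sub1 hi).1 sub2 lo).2
      = Aval f s hi lo S.toList [] 0 := by
  simp only [remove_and_score, Aval, run1, run2, h1, h2, String.toList_ofList]

-- ===== VERDICT (by name: the statement is the Claim_ definition above) =====
theorem solve_spec : Claim_equal_solve := by
  intro X Y S _
  unfold Spec_solve
  by_cases h : X ≥ Y
  · have hA : solve X Y S = Aval 'p' 'r' X Y S.toList [] 0 := by
      rw [show solve X Y S = (remove_and_score S "pr" X).2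
          + (remove_and_score (remove_and_score S "pr" X).1 "rp" Y).2 by
        simp only [solve, if_pos h]]
      exact solve_glueA S "pr" "rp" 'p' 'r' rfl rfl X Y
    have hB : solve_alt X Y S = Bval 'p' 'r' X Y S.toList 0 0 0 := by
      simp only [solve_alt, if_pos h, Bval, runB]
    rw [hA, hB]
    exact main_eq 'p' 'r' X Y (by decide) S.toList
  · have hA : solve X Y S = Aval 'r' 'p' Y X S.toList [] 0 := by
      rw [show solve X Y S = (remove_and_score S "rp" Y).2
          + (remove_and_score (remove_and_score S "rp" Y).1 "pr" X).2 by
        simp only [solve, if_neg h]]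
      exact solve_glueA S "rp" "pr" 'r' 'p' rfl rfl Y X
    have hB : solve_alt X Y S = Bval 'r' 'p' Y X S.toList 0 0 0 := by
      simp only [solve_alt, if_neg h, Bval, runB]
    rw [hA, hB]
    exact main_eq 'r' 'p' Y X (by decide) S.toList
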